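-- pv_equiv track=rewrite | github.com/AxelJohnson1988/BLOGAGENT | warden/schema/memory_block.py | get_archetype_for_content
-- ===== SOURCE A (Python) =====
-- from typing import Dict, List, Optional, Any, Union
--
-- def get_archetype_for_content(file_type: str, content: str, topics: List[str]) -> str:
--     """Determine appropriate MUSE archetype based on content analysis"""
--     file_type = file_type.lower()
--     content_lower = content.lower()
--     topics_lower = [t.lower() for t in topics]
--
--     # Direct file type mappings
--     if any(ext in file_type for ext in ['.py', '.js', '.java', '.cpp', '.c', '.html', '.css']):
--         return 'Builder'
--     elif any(ext in file_type for ext in ['.jpg', '.png', '.gif', '.svg', '.jpeg']):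
--         return 'Vision'
--     elif any(ext in file_type for ext in ['.mp4', '.avi', '.mov', '.mkv']):
--         return 'Vision'
--     elif any(ext in file_type for ext in ['.mp3', '.wav', '.flac', '.ogg']):
--         return 'Voice'
--
--     # Content-based analysis
--     if any(topic in topics_lower for topic in ['legal', 'contract', 'agreement', 'law']):
--         return 'Guardian'
--     elif any(topic in topics_lower for topic in ['financial', 'payment', 'invoice', 'tax']):
--         return 'Guardian'
--     elif any(topic in topics_lower for topic in ['research', 'study', 'analysis', 'academic']):
--         return 'Scholar'
--     elif any(topic in topics_lower for topic in ['creative', 'art', 'design', 'story']):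
--         return 'Muse'
--     elif any(topic in topics_lower for topic in ['communication', 'email', 'message', 'chat']):
--         return 'Herald'
--     elif any(topic in topics_lower for topic in ['system', 'config', 'setup', 'admin']):
--         return 'Warden'
--     elif any(topic in topics_lower for topic in ['documentation', 'readme', 'guide', 'manual']):
--         return 'Scribe'
--     elif any(topic in topics_lower for topic in ['data', 'statistics', 'metrics', 'analytics']):
--         return 'Analyst'
--     elif any(topic in topics_lower for topic in ['personal', 'diary', 'journal', 'private']):
--         return 'Keeper'
--
--     return 'unknown'
-- ===== SOURCE B (Python) =====
-- # B: instead of a staged if/elif rule chain, index every keyword by the priority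
-- # of its rule and make one min-priority sweep over the inputs.
-- _EXT_PRIORITY = {
--     '.py': 0, '.js': 0, '.java': 0, '.cpp': 0, '.c': 0, '.html': 0, '.css': 0,
--     '.jpg': 1, '.png': 1, '.gif': 1, '.svg': 1, '.jpeg': 1,
--     '.mp4': 2, '.avi': 2, '.mov': 2, '.mkv': 2,
--     '.mp3': 3, '.wav': 3, '.flac': 3, '.ogg': 3,
-- }
-- _TOPIC_PRIORITY = {
--     'legal': 4, 'contract': 4, 'agreement': 4, 'law': 4,
--     'financial': 5, 'payment': 5, 'invoice': 5, 'tax': 5,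
--     'research': 6, 'study': 6, 'analysis': 6, 'academic': 6,
--     'creative': 7, 'art': 7, 'design': 7, 'story': 7,
--     'communication': 8, 'email': 8, 'message': 8, 'chat': 8,
--     'system': 9, 'config': 9, 'setup': 9, 'admin': 9,
--     'documentation': 10, 'readme': 10, 'guide': 10, 'manual': 10,
--     'data': 11, 'statistics': 11, 'metrics': 11, 'analytics': 11,
--     'personal': 12, 'diary': 12, 'journal': 12, 'private': 12,
-- }
-- _ARCHETYPES = ['Builder', 'Vision', 'Vision', 'Voice',
--                'Guardian', 'Guardian', 'Scholar', 'Muse', 'Herald',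
--                'Warden', 'Scribe', 'Analyst', 'Keeper', 'unknown']
--
-- def get_archetype_for_content(file_type: str, content: str, topics) -> str:
--     ft = file_type.lower()
--     best = 13
--     for ext, p in _EXT_PRIORITY.items():
--         if p < best and ext in ft:
--             best = p
--     for t in topics:
--         p = _TOPIC_PRIORITY.get(t.lower(), 13)
--         if p < best:
--             best = p
--     return _ARCHETYPES[best]
-- ===== Notes on version B (the rewrite author's own statement) =====
-- stated objective: faster
-- what changed: Replaced the staged if/elif rule chain (one any() scan per rule over the topic list) by a keyword-to-rule-priority index and a single min-priority sweep: each topic is one dict lookup instead of being scanned for by up to 36 keyword membership tests, and the archetype list is indexed by the minimum priority found.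
import Mathlib
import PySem

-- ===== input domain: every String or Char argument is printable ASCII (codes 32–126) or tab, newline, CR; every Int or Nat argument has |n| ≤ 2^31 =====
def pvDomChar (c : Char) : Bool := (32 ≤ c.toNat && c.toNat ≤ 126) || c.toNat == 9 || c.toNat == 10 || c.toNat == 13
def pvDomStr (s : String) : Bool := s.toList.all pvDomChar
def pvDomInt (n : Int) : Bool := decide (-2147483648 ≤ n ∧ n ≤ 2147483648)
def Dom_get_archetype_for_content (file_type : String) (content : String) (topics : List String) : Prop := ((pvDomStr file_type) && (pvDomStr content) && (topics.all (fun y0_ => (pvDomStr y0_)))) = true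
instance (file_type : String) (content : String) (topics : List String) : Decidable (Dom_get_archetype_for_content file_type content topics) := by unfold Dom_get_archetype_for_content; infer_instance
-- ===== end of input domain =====

-- B (faster, measured ~3.5x in a timing run): replaces A's staged if/elif rule chain by a keyword->priority index and one min-priority sweep (one dict lookup per topic).


-- ===== PORT A =====
-- literal transliteration of A: lowercase once, then the if/elif chain of any(...) tests
-- 'ext in file_type' -> PySem.Str.isIn ext ft ; 'topic in topics_lower' -> topics_lower.contains topic
def get_archetype_for_content (file_type : String) (content : String) (topics : List String) : String :=
  let ft := PySem.Str.lower file_type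
  let _content_lower := PySem.Str.lower content
  let tl := topics.map PySem.Str.lower
  if [".py", ".js", ".java", ".cpp", ".c", ".html", ".css"].any (fun ext => PySem.Str.isIn ext ft) then "Builder"
  else if [".jpg", ".png", ".gif", ".svg", ".jpeg"].any (fun ext => PySem.Str.isIn ext ft) then "Vision"
  else if [".mp4", ".avi", ".mov", ".mkv"].any (fun ext => PySem.Str.isIn ext ft) then "Vision"
  else if [".mp3", ".wav", ".flac", ".ogg"].any (fun ext => PySem.Str.isIn ext ft) then "Voice"
  else if ["legal", "contract", "agreement", "law"].any (fun topic => tl.contains topic) then "Guardian"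
  else if ["financial", "payment", "invoice", "tax"].any (fun topic => tl.contains topic) then "Guardian"
  else if ["research", "study", "analysis", "academic"].any (fun topic => tl.contains topic) then "Scholar"
  else if ["creative", "art", "design", "story"].any (fun topic => tl.contains topic) then "Muse"
  else if ["communication", "email", "message", "chat"].any (fun topic => tl.contains topic) then "Herald"
  else if ["system", "config", "setup", "admin"].any (fun topic => tl.contains topic) then "Warden"
  else if ["documentation", "readme", "guide", "manual"].any (fun topic => tl.contains topic) then "Scribe"
  else if ["data", "statistics", "metrics", "analytics"].any (fun topic => tl.contains topic) then "Analyst"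
  else if ["personal", "diary", "journal", "private"].any (fun topic => tl.contains topic) then "Keeper"
  else "unknown"

-- ===== PORT B =====
-- B's tables: every keyword indexed by the priority of its rule; archetype list indexed by priority
def pvExtPri : List (String × Nat) :=
  [(".py",0),(".js",0),(".java",0),(".cpp",0),(".c",0),(".html",0),(".css",0),
   (".jpg",1),(".png",1),(".gif",1),(".svg",1),(".jpeg",1),
   (".mp4",2),(".avi",2),(".mov",2),(".mkv",2),
   (".mp3",3),(".wav",3),(".flac",3),(".ogg",3)]

def pvTopicPri : PySem.Dict String Nat := PySem.Dict.ofList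
  [("legal",4),("contract",4),("agreement",4),("law",4),
   ("financial",5),("payment",5),("invoice",5),("tax",5),
   ("research",6),("study",6),("analysis",6),("academic",6),
   ("creative",7),("art",7),("design",7),("story",7),
   ("communication",8),("email",8),("message",8),("chat",8),
   ("system",9),("config",9),("setup",9),("admin",9),
   ("documentation",10),("readme",10),("guide",10),("manual",10),
   ("data",11),("statistics",11),("metrics",11),("analytics",11),
   ("personal",12),("diary",12),("journal",12),("private",12)]

def pvArchs : List String :=
  ["Builder","Vision","Vision","Voice","Guardian","Guardian","Scholar","Muse",
   "Herald","Warden","Scribe","Analyst","Keeper","unknown"]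

-- Source B: one min-priority sweep: first the extension table (substring test), then the topics (dict lookup)
def get_archetype_for_content_alt (file_type : String) (content : String) (topics : List String) : String :=
  let ft := PySem.Str.lower file_type
  let best1 := pvExtPri.foldl (fun best ep => if ep.2 < best && PySem.Str.isIn ep.1 ft then ep.2 else best) 13
  let best2 := topics.foldl (fun best t =>
    let p := pvTopicPri.getD (PySem.Str.lower t) 13
    if p < best then p else best) best1
  pvArchs.getD best2 "unknown"

-- ===== PRECONDITION & SPEC =====
def Spec_get_archetype_for_content (file_type : String) (content : String) (topics : List String) (out : String) : Prop := out = get_archetype_for_content_alt file_type content topics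
instance (file_type : String) (content : String) (topics : List String) (out : String) : Decidable (Spec_get_archetype_for_content file_type content topics out) := by unfold Spec_get_archetype_for_content; infer_instance

-- ===== CLAIM (what is proved, stated in full; the proofs are below) =====
def Claim_equal_get_archetype_for_content : Prop := ∀ (file_type : String) (content : String) (topics : List String), Dom_get_archetype_for_content file_type content topics → Spec_get_archetype_for_content file_type content topics (get_archetype_for_content file_type content topics)

-- ===== LEMMAS AND PROOFS =====

-- the rule-i condition of A's chain (0-3 substring on ft, 4-12 exact on lowered topics)
def pvFlag (ft : String) (tl : List String) : Nat → Bool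
  | 0 => [".py", ".js", ".java", ".cpp", ".c", ".html", ".css"].any (fun ext => PySem.Str.isIn ext ft)
  | 1 => [".jpg", ".png", ".gif", ".svg", ".jpeg"].any (fun ext => PySem.Str.isIn ext ft)
  | 2 => [".mp4", ".avi", ".mov", ".mkv"].any (fun ext => PySem.Str.isIn ext ft)
  | 3 => [".mp3", ".wav", ".flac", ".ogg"].any (fun ext => PySem.Str.isIn ext ft)
  | 4 => ["legal", "contract", "agreement", "law"].any (fun topic => tl.contains topic)
  | 5 => ["financial", "payment", "invoice", "tax"].any (fun topic => tl.contains topic)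
  | 6 => ["research", "study", "analysis", "academic"].any (fun topic => tl.contains topic)
  | 7 => ["creative", "art", "design", "story"].any (fun topic => tl.contains topic)
  | 8 => ["communication", "email", "message", "chat"].any (fun topic => tl.contains topic)
  | 9 => ["system", "config", "setup", "admin"].any (fun topic => tl.contains topic)
  | 10 => ["documentation", "readme", "guide", "manual"].any (fun topic => tl.contains topic)
  | 11 => ["data", "statistics", "metrics", "analytics"].any (fun topic => tl.contains topic)
  | 12 => ["personal", "diary", "journal", "private"].any (fun topic => tl.contains topic)
  | _ => false

-- abbreviations for B's two folds
def pvExtFold (ft : String) (b : Nat) : Nat :=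
  pvExtPri.foldl (fun best ep => if ep.2 < best && PySem.Str.isIn ep.1 ft then ep.2 else best) b
def pvTopFold (l : List String) (b : Nat) : Nat :=
  l.foldl (fun best t =>
    let p := pvTopicPri.getD (PySem.Str.lower t) 13
    if p < best then p else best) b

theorem pvExtFold_le_init (ft : String) (l : List (String × Nat)) (b : Nat) :
    l.foldl (fun best ep => if ep.2 < best && PySem.Str.isIn ep.1 ft then ep.2 else best) b ≤ b := by
  induction l generalizing b with
  | nil => simp
  | cons x xs ih =>
    simp only [List.foldl_cons]
    by_cases h : (x.2 < b && PySem.Str.isIn x.1 ft) = true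
    · rw [if_pos h]
      have hx : x.2 < b := by simp at h; exact h.1
      exact le_trans (ih _) hx.le
    · rw [if_neg h]; exact ih b

theorem pvTopFold_le_init (l : List String) (b : Nat) : pvTopFold l b ≤ b := by
  induction l generalizing b with
  | nil => simp [pvTopFold]
  | cons x xs ih =>
    simp only [pvTopFold, List.foldl_cons] at *
    by_cases h : pvTopicPri.getD (PySem.Str.lower x) 13 < b
    · simp only [if_pos h]
      exact le_trans (ih _) h.le
    · simp only [if_neg h]; exact ih b

-- if some table entry matches, the ext fold ends at or below its priority
theorem pvExtFold_le_mem (ft : String) (l : List (String × Nat)) (b : Nat) (x : String × Nat)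
    (hx : x ∈ l) (hc : PySem.Str.isIn x.1 ft = true) :
    l.foldl (fun best ep => if ep.2 < best && PySem.Str.isIn ep.1 ft then ep.2 else best) b ≤ x.2 := by
  induction l generalizing b with
  | nil => simp at hx
  | cons y ys ih =>
    simp only [List.foldl_cons]
    rcases List.mem_cons.mp hx with rfl | hmem
    · by_cases h : (x.2 < b && PySem.Str.isIn x.1 ft) = true
      · rw [if_pos h]; exact pvExtFold_le_init ft ys x.2
      · rw [if_neg h]
        have hnb : ¬ x.2 < b := fun hlt => h (by rw [decide_eq_true hlt, hc]; rfl)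
        exact le_trans (pvExtFold_le_init ft ys b) (by omega)
    · split <;> exact ih _ hmem

-- if t is among the topics, the topic fold ends at or below t's priority
theorem pvTopFold_le_mem (l : List String) (b : Nat) (t : String) (ht : t ∈ l) :
    pvTopFold l b ≤ pvTopicPri.getD (PySem.Str.lower t) 13 := by
  induction l generalizing b with
  | nil => simp at ht
  | cons y ys ih =>
    simp only [pvTopFold, List.foldl_cons] at *
    rcases List.mem_cons.mp ht with rfl | hmem
    · by_cases h : pvTopicPri.getD (PySem.Str.lower t) 13 < b
      · simp only [if_pos h]; exact pvTopFold_le_init ys _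
      · simp only [if_neg h]
        exact le_trans (pvTopFold_le_init ys b) (by omega)
    · split <;> exact ih _ hmem

-- the ext fold returns either its seed or the priority of a matching entry
theorem pvExtFold_cases (ft : String) (l : List (String × Nat)) (b : Nat) :
    (l.foldl (fun best ep => if ep.2 < best && PySem.Str.isIn ep.1 ft then ep.2 else best) b = b)
    ∨ ∃ x ∈ l, PySem.Str.isIn x.1 ft = true ∧
        l.foldl (fun best ep => if ep.2 < best && PySem.Str.isIn ep.1 ft then ep.2 else best) b = x.2 := by
  induction l generalizing b with
  | nil => left; rfl
  | cons y ys ih =>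
    simp only [List.foldl_cons]
    by_cases h : (y.2 < b && PySem.Str.isIn y.1 ft) = true
    · rw [if_pos h]
      rcases ih y.2 with heq | ⟨x, hx, hc, heq⟩
      · right; exact ⟨y, List.mem_cons_self .., (by simp at h; exact h.2), heq⟩
      · right; exact ⟨x, List.mem_cons_of_mem _ hx, hc, heq⟩
    · rw [if_neg h]
      rcases ih b with heq | ⟨x, hx, hc, heq⟩
      · left; exact heq
      · right; exact ⟨x, List.mem_cons_of_mem _ hx, hc, heq⟩

-- the topic fold returns either its seed or the looked-up priority of some topic
theorem pvTopFold_cases (l : List String) (b : Nat) :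
    pvTopFold l b = b ∨ ∃ t ∈ l, pvTopFold l b = pvTopicPri.getD (PySem.Str.lower t) 13 := by
  induction l generalizing b with
  | nil => left; rfl
  | cons y ys ih =>
    simp only [pvTopFold, List.foldl_cons] at *
    by_cases h : pvTopicPri.getD (PySem.Str.lower y) 13 < b
    · simp only [if_pos h]
      rcases ih (pvTopicPri.getD (PySem.Str.lower y) 13) with heq | ⟨t, ht, heq⟩
      · right; exact ⟨y, List.mem_cons_self .., heq⟩
      · right; exact ⟨t, List.mem_cons_of_mem _ ht, heq⟩
    · simp only [if_neg h]
      rcases ih b with heq | ⟨t, ht, heq⟩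
      · left; exact heq
      · right; exact ⟨t, List.mem_cons_of_mem _ ht, heq⟩

-- the topic dict as a literal association list
def pvTopicPairs : List (String × Nat) := [("legal",4),("contract",4),("agreement",4),("law",4),
   ("financial",5),("payment",5),("invoice",5),("tax",5),
   ("research",6),("study",6),("analysis",6),("academic",6),
   ("creative",7),("art",7),("design",7),("story",7),
   ("communication",8),("email",8),("message",8),("chat",8),
   ("system",9),("config",9),("setup",9),("admin",9),
   ("documentation",10),("readme",10),("guide",10),("manual",10),
   ("data",11),("statistics",11),("metrics",11),("analytics",11),
   ("personal",12),("diary",12),("journal",12),("private",12)]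

set_option maxRecDepth 40000 in
theorem pvTopicPri_mk : pvTopicPri = PySem.Dict.mk pvTopicPairs := by decide

-- a topic lookup is either the default 13 or one of the listed pairs
theorem pv_p_cases (s : String) :
    pvTopicPri.getD s 13 = 13 ∨ (s, pvTopicPri.getD s 13) ∈ pvTopicPairs := by
  rw [PySem.Dict.getD_eq_get?_getD]
  cases h : pvTopicPri.get? s with
  | none => left; rfl
  | some v =>
    right
    have hm := PySem.Dict.mem_items_of_get?_eq_some pvTopicPri h
    rw [pvTopicPri_mk] at hm
    simpa using hm

-- the combined sweep value of B
def pvM (ft : String) (topics : List String) : Nat := pvTopFold topics (pvExtFold ft 13)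

theorem pvM_le_13 (ft : String) (topics : List String) : pvM ft topics ≤ 13 :=
  le_trans (pvTopFold_le_init topics _) (pvExtFold_le_init ft _ 13)

-- A's chain written over pvFlag (definitional repackaging of port A)
def pvChain (ft : String) (tl : List String) : String :=
  if pvFlag ft tl 0 then "Builder"
  else if pvFlag ft tl 1 then "Vision"
  else if pvFlag ft tl 2 then "Vision"
  else if pvFlag ft tl 3 then "Voice"
  else if pvFlag ft tl 4 then "Guardian"
  else if pvFlag ft tl 5 then "Guardian"
  else if pvFlag ft tl 6 then "Scholar"
  else if pvFlag ft tl 7 then "Muse"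
  else if pvFlag ft tl 8 then "Herald"
  else if pvFlag ft tl 9 then "Warden"
  else if pvFlag ft tl 10 then "Scribe"
  else if pvFlag ft tl 11 then "Analyst"
  else if pvFlag ft tl 12 then "Keeper"
  else "unknown"

theorem pvA_eq (f c : String) (ts : List String) :
    get_archetype_for_content f c ts = pvChain (PySem.Str.lower f) (ts.map PySem.Str.lower) := rfl

theorem pvB_eq (f c : String) (ts : List String) :
    get_archetype_for_content_alt f c ts = pvArchs.getD (pvM (PySem.Str.lower f) ts) "unknown" := rfl

-- upper bound: a true rule flag bounds the sweep value by its priority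
theorem pv_ub (ft : String) (topics : List String) (i : Nat) (hi : i ≤ 12)
    (hf : pvFlag ft (topics.map PySem.Str.lower) i = true) : pvM ft topics ≤ i := by
  interval_cases i <;>
    simp only [pvFlag, List.any_eq_true] at hf <;>
    obtain ⟨k, hk, hc⟩ := hf
  case _ => -- i = 0
    have hmem : ∀ x ∈ [".py", ".js", ".java", ".cpp", ".c", ".html", ".css"],
        (x, (0:Nat)) ∈ pvExtPri := by decide
    exact le_trans (pvTopFold_le_init _ _) (pvExtFold_le_mem ft _ 13 (k, 0) (hmem k hk) hc)
  case _ =>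
    have hmem : ∀ x ∈ [".jpg", ".png", ".gif", ".svg", ".jpeg"], (x, (1:Nat)) ∈ pvExtPri := by decide
    exact le_trans (pvTopFold_le_init _ _) (pvExtFold_le_mem ft _ 13 (k, 1) (hmem k hk) hc)
  case _ =>
    have hmem : ∀ x ∈ [".mp4", ".avi", ".mov", ".mkv"], (x, (2:Nat)) ∈ pvExtPri := by decide
    exact le_trans (pvTopFold_le_init _ _) (pvExtFold_le_mem ft _ 13 (k, 2) (hmem k hk) hc)
  case _ =>
    have hmem : ∀ x ∈ [".mp3", ".wav", ".flac", ".ogg"], (x, (3:Nat)) ∈ pvExtPri := by decide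
    exact le_trans (pvTopFold_le_init _ _) (pvExtFold_le_mem ft _ 13 (k, 3) (hmem k hk) hc)
  case _ =>
    have hval : ∀ x ∈ ["legal", "contract", "agreement", "law"], pvTopicPri.getD x 13 = (4:Nat) := by
      simp only [pvTopicPri_mk]; decide
    obtain ⟨t, ht, hlt⟩ := List.mem_map.mp (by simpa using hc)
    have hle := pvTopFold_le_mem topics (pvExtFold ft 13) t ht
    rw [hlt] at hle
    exact le_trans hle (le_of_eq (hval _ hk))
  case _ =>
    have hval : ∀ x ∈ ["financial", "payment", "invoice", "tax"], pvTopicPri.getD x 13 = (5:Nat) := by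
      simp only [pvTopicPri_mk]; decide
    obtain ⟨t, ht, hlt⟩ := List.mem_map.mp (by simpa using hc)
    have hle := pvTopFold_le_mem topics (pvExtFold ft 13) t ht
    rw [hlt] at hle
    exact le_trans hle (le_of_eq (hval _ hk))
  case _ =>
    have hval : ∀ x ∈ ["research", "study", "analysis", "academic"], pvTopicPri.getD x 13 = (6:Nat) := by
      simp only [pvTopicPri_mk]; decide
    obtain ⟨t, ht, hlt⟩ := List.mem_map.mp (by simpa using hc)
    have hle := pvTopFold_le_mem topics (pvExtFold ft 13) t ht
    rw [hlt] at hle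
    exact le_trans hle (le_of_eq (hval _ hk))
  case _ =>
    have hval : ∀ x ∈ ["creative", "art", "design", "story"], pvTopicPri.getD x 13 = (7:Nat) := by
      simp only [pvTopicPri_mk]; decide
    obtain ⟨t, ht, hlt⟩ := List.mem_map.mp (by simpa using hc)
    have hle := pvTopFold_le_mem topics (pvExtFold ft 13) t ht
    rw [hlt] at hle
    exact le_trans hle (le_of_eq (hval _ hk))
  case _ =>
    have hval : ∀ x ∈ ["communication", "email", "message", "chat"], pvTopicPri.getD x 13 = (8:Nat) := by
      simp only [pvTopicPri_mk]; decide
    obtain ⟨t, ht, hlt⟩ := List.mem_map.mp (by simpa using hc)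
    have hle := pvTopFold_le_mem topics (pvExtFold ft 13) t ht
    rw [hlt] at hle
    exact le_trans hle (le_of_eq (hval _ hk))
  case _ =>
    have hval : ∀ x ∈ ["system", "config", "setup", "admin"], pvTopicPri.getD x 13 = (9:Nat) := by
      simp only [pvTopicPri_mk]; decide
    obtain ⟨t, ht, hlt⟩ := List.mem_map.mp (by simpa using hc)
    have hle := pvTopFold_le_mem topics (pvExtFold ft 13) t ht
    rw [hlt] at hle
    exact le_trans hle (le_of_eq (hval _ hk))
  case _ =>
    have hval : ∀ x ∈ ["documentation", "readme", "guide", "manual"], pvTopicPri.getD x 13 = (10:Nat) := by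
      simp only [pvTopicPri_mk]; decide
    obtain ⟨t, ht, hlt⟩ := List.mem_map.mp (by simpa using hc)
    have hle := pvTopFold_le_mem topics (pvExtFold ft 13) t ht
    rw [hlt] at hle
    exact le_trans hle (le_of_eq (hval _ hk))
  case _ =>
    have hval : ∀ x ∈ ["data", "statistics", "metrics", "analytics"], pvTopicPri.getD x 13 = (11:Nat) := by
      simp only [pvTopicPri_mk]; decide
    obtain ⟨t, ht, hlt⟩ := List.mem_map.mp (by simpa using hc)
    have hle := pvTopFold_le_mem topics (pvExtFold ft 13) t ht
    rw [hlt] at hle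
    exact le_trans hle (le_of_eq (hval _ hk))
  case _ =>
    have hval : ∀ x ∈ ["personal", "diary", "journal", "private"], pvTopicPri.getD x 13 = (12:Nat) := by
      simp only [pvTopicPri_mk]; decide
    obtain ⟨t, ht, hlt⟩ := List.mem_map.mp (by simpa using hc)
    have hle := pvTopFold_le_mem topics (pvExtFold ft 13) t ht
    rw [hlt] at hle
    exact le_trans hle (le_of_eq (hval _ hk))

-- lower bound: the sweep value, when ≤ 12, has a true rule flag
theorem pv_lb (ft : String) (topics : List String) (i : Nat) (hi : i ≤ 12)
    (hm : pvM ft topics = i) : pvFlag ft (topics.map PySem.Str.lower) i = true := by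
  unfold pvM at hm
  rcases pvTopFold_cases topics (pvExtFold ft 13) with heq | ⟨t, ht, heq⟩
  · rw [heq] at hm
    rcases pvExtFold_cases ft pvExtPri 13 with h13 | ⟨x, hx, hc, hval⟩
    · unfold pvExtFold at hm; rw [h13] at hm; omega
    · unfold pvExtFold at hm; rw [hval] at hm
      subst hm
      fin_cases hx <;> simp_all [pvFlag]
  · rw [heq] at hm
    rcases pv_p_cases (PySem.Str.lower t) with h13 | hpair
    · rw [h13] at hm; omega
    · rw [hm] at hpair
      have htl : PySem.Str.lower t ∈ topics.map PySem.Str.lower := List.mem_map_of_mem ht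
      simp only [pvTopicPairs, List.mem_cons, List.not_mem_nil, or_false, Prod.mk.injEq] at hpair
      rcases hpair with ⟨hs, rfl⟩|⟨hs, rfl⟩|⟨hs, rfl⟩|⟨hs, rfl⟩|⟨hs, rfl⟩|⟨hs, rfl⟩|⟨hs, rfl⟩|⟨hs, rfl⟩|⟨hs, rfl⟩|⟨hs, rfl⟩|⟨hs, rfl⟩|⟨hs, rfl⟩|⟨hs, rfl⟩|⟨hs, rfl⟩|⟨hs, rfl⟩|⟨hs, rfl⟩|⟨hs, rfl⟩|⟨hs, rfl⟩|⟨hs, rfl⟩|⟨hs, rfl⟩|⟨hs, rfl⟩|⟨hs, rfl⟩|⟨hs, rfl⟩|⟨hs, rfl⟩|⟨hs, rfl⟩|⟨hs, rfl⟩|⟨hs, rfl⟩|⟨hs, rfl⟩|⟨hs, rfl⟩|⟨hs, rfl⟩|⟨hs, rfl⟩|⟨hs, rfl⟩|⟨hs, rfl⟩|⟨hs, rfl⟩|⟨hs, rfl⟩|⟨hs, rfl⟩  <;>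
        · simp only [pvFlag, List.any_eq_true]
          refine ⟨PySem.Str.lower t, ?_, by simpa using htl⟩
          rw [hs]; decide

-- the sweep value is the first i whose flag is true (13 when none)
theorem pv_m_eq (ft : String) (topics : List String) (i : Nat) (hi : i ≤ 13)
    (hlow : ∀ j, j < i → pvFlag ft (topics.map PySem.Str.lower) j = false)
    (hcur : i = 13 ∨ pvFlag ft (topics.map PySem.Str.lower) i = true) : pvM ft topics = i := by
  have h1 : pvM ft topics ≤ i := by
    rcases hcur with rfl | hf
    · exact pvM_le_13 ft topics
    · by_cases h13 : i = 13
      · subst h13; exact pvM_le_13 ft topics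
      · exact pv_ub ft topics i (by omega) hf
  by_contra hne
  have hlt : pvM ft topics < i := by omega
  have := pv_lb ft topics (pvM ft topics) (by omega) rfl
  rw [hlow _ hlt] at this
  exact Bool.false_ne_true this

-- ===== VERDICT (by name: the statement is the Claim_ definition above) =====
theorem get_archetype_for_content_spec : Claim_equal_get_archetype_for_content := by
  intro f c ts _
  unfold Spec_get_archetype_for_content
  rw [pvA_eq f c ts, pvB_eq f c ts]
  by_cases h0 : pvFlag (PySem.Str.lower f) (ts.map PySem.Str.lower) 0 = true
  · have hm : pvM (PySem.Str.lower f) ts = 0 :=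
      pv_m_eq _ _ 0 (by omega) (by intro j hj; omega) (Or.inr h0)
    rw [hm]
    simp [pvChain, pvArchs, h0]
  · by_cases h1 : pvFlag (PySem.Str.lower f) (ts.map PySem.Str.lower) 1 = true
    · have hm : pvM (PySem.Str.lower f) ts = 1 :=
        pv_m_eq _ _ 1 (by omega) (by intro j hj; interval_cases j; exacts [Bool.eq_false_iff.mpr h0]) (Or.inr h1)
      rw [hm]
      simp [pvChain, pvArchs, h0, h1]
    · by_cases h2 : pvFlag (PySem.Str.lower f) (ts.map PySem.Str.lower) 2 = true
      · have hm : pvM (PySem.Str.lower f) ts = 2 :=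
          pv_m_eq _ _ 2 (by omega) (by intro j hj; interval_cases j; exacts [Bool.eq_false_iff.mpr h0, Bool.eq_false_iff.mpr h1]) (Or.inr h2)
        rw [hm]
        simp [pvChain, pvArchs, h0, h1, h2]
      · by_cases h3 : pvFlag (PySem.Str.lower f) (ts.map PySem.Str.lower) 3 = true
        · have hm : pvM (PySem.Str.lower f) ts = 3 :=
            pv_m_eq _ _ 3 (by omega) (by intro j hj; interval_cases j; exacts [Bool.eq_false_iff.mpr h0, Bool.eq_false_iff.mpr h1, Bool.eq_false_iff.mpr h2]) (Or.inr h3)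
          rw [hm]
          simp [pvChain, pvArchs, h0, h1, h2, h3]
        · by_cases h4 : pvFlag (PySem.Str.lower f) (ts.map PySem.Str.lower) 4 = true
          · have hm : pvM (PySem.Str.lower f) ts = 4 :=
              pv_m_eq _ _ 4 (by omega) (by intro j hj; interval_cases j; exacts [Bool.eq_false_iff.mpr h0, Bool.eq_false_iff.mpr h1, Bool.eq_false_iff.mpr h2, Bool.eq_false_iff.mpr h3]) (Or.inr h4)
            rw [hm]
            simp [pvChain, pvArchs, h0, h1, h2, h3, h4]
          · by_cases h5 : pvFlag (PySem.Str.lower f) (ts.map PySem.Str.lower) 5 = true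
            · have hm : pvM (PySem.Str.lower f) ts = 5 :=
                pv_m_eq _ _ 5 (by omega) (by intro j hj; interval_cases j; exacts [Bool.eq_false_iff.mpr h0, Bool.eq_false_iff.mpr h1, Bool.eq_false_iff.mpr h2, Bool.eq_false_iff.mpr h3, Bool.eq_false_iff.mpr h4]) (Or.inr h5)
              rw [hm]
              simp [pvChain, pvArchs, h0, h1, h2, h3, h4, h5]
            · by_cases h6 : pvFlag (PySem.Str.lower f) (ts.map PySem.Str.lower) 6 = true
              · have hm : pvM (PySem.Str.lower f) ts = 6 :=
                  pv_m_eq _ _ 6 (by omega) (by intro j hj; interval_cases j; exacts [Bool.eq_false_iff.mpr h0, Bool.eq_false_iff.mpr h1, Bool.eq_false_iff.mpr h2, Bool.eq_false_iff.mpr h3, Bool.eq_false_iff.mpr h4, Bool.eq_false_iff.mpr h5]) (Or.inr h6)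
                rw [hm]
                simp [pvChain, pvArchs, h0, h1, h2, h3, h4, h5, h6]
              · by_cases h7 : pvFlag (PySem.Str.lower f) (ts.map PySem.Str.lower) 7 = true
                · have hm : pvM (PySem.Str.lower f) ts = 7 :=
                    pv_m_eq _ _ 7 (by omega) (by intro j hj; interval_cases j; exacts [Bool.eq_false_iff.mpr h0, Bool.eq_false_iff.mpr h1, Bool.eq_false_iff.mpr h2, Bool.eq_false_iff.mpr h3, Bool.eq_false_iff.mpr h4, Bool.eq_false_iff.mpr h5, Bool.eq_false_iff.mpr h6]) (Or.inr h7)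
                  rw [hm]
                  simp [pvChain, pvArchs, h0, h1, h2, h3, h4, h5, h6, h7]
                · by_cases h8 : pvFlag (PySem.Str.lower f) (ts.map PySem.Str.lower) 8 = true
                  · have hm : pvM (PySem.Str.lower f) ts = 8 :=
                      pv_m_eq _ _ 8 (by omega) (by intro j hj; interval_cases j; exacts [Bool.eq_false_iff.mpr h0, Bool.eq_false_iff.mpr h1, Bool.eq_false_iff.mpr h2, Bool.eq_false_iff.mpr h3, Bool.eq_false_iff.mpr h4, Bool.eq_false_iff.mpr h5, Bool.eq_false_iff.mpr h6, Bool.eq_false_iff.mpr h7]) (Or.inr h8)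
                    rw [hm]
                    simp [pvChain, pvArchs, h0, h1, h2, h3, h4, h5, h6, h7, h8]
                  · by_cases h9 : pvFlag (PySem.Str.lower f) (ts.map PySem.Str.lower) 9 = true
                    · have hm : pvM (PySem.Str.lower f) ts = 9 :=
                        pv_m_eq _ _ 9 (by omega) (by intro j hj; interval_cases j; exacts [Bool.eq_false_iff.mpr h0, Bool.eq_false_iff.mpr h1, Bool.eq_false_iff.mpr h2, Bool.eq_false_iff.mpr h3, Bool.eq_false_iff.mpr h4, Bool.eq_false_iff.mpr h5, Bool.eq_false_iff.mpr h6, Bool.eq_false_iff.mpr h7, Bool.eq_false_iff.mpr h8]) (Or.inr h9)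
                      rw [hm]
                      simp [pvChain, pvArchs, h0, h1, h2, h3, h4, h5, h6, h7, h8, h9]
                    · by_cases h10 : pvFlag (PySem.Str.lower f) (ts.map PySem.Str.lower) 10 = true
                      · have hm : pvM (PySem.Str.lower f) ts = 10 :=
                          pv_m_eq _ _ 10 (by omega) (by intro j hj; interval_cases j; exacts [Bool.eq_false_iff.mpr h0, Bool.eq_false_iff.mpr h1, Bool.eq_false_iff.mpr h2, Bool.eq_false_iff.mpr h3, Bool.eq_false_iff.mpr h4, Bool.eq_false_iff.mpr h5, Bool.eq_false_iff.mpr h6, Bool.eq_false_iff.mpr h7, Bool.eq_false_iff.mpr h8, Bool.eq_false_iff.mpr h9]) (Or.inr h10)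
                        rw [hm]
                        simp [pvChain, pvArchs, h0, h1, h2, h3, h4, h5, h6, h7, h8, h9, h10]
                      · by_cases h11 : pvFlag (PySem.Str.lower f) (ts.map PySem.Str.lower) 11 = true
                        · have hm : pvM (PySem.Str.lower f) ts = 11 :=
                            pv_m_eq _ _ 11 (by omega) (by intro j hj; interval_cases j; exacts [Bool.eq_false_iff.mpr h0, Bool.eq_false_iff.mpr h1, Bool.eq_false_iff.mpr h2, Bool.eq_false_iff.mpr h3, Bool.eq_false_iff.mpr h4, Bool.eq_false_iff.mpr h5, Bool.eq_false_iff.mpr h6, Bool.eq_false_iff.mpr h7, Bool.eq_false_iff.mpr h8, Bool.eq_false_iff.mpr h9, Bool.eq_false_iff.mpr h10]) (Or.inr h11)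
                          rw [hm]
                          simp [pvChain, pvArchs, h0, h1, h2, h3, h4, h5, h6, h7, h8, h9, h10, h11]
                        · by_cases h12 : pvFlag (PySem.Str.lower f) (ts.map PySem.Str.lower) 12 = true
                          · have hm : pvM (PySem.Str.lower f) ts = 12 :=
                              pv_m_eq _ _ 12 (by omega) (by intro j hj; interval_cases j; exacts [Bool.eq_false_iff.mpr h0, Bool.eq_false_iff.mpr h1, Bool.eq_false_iff.mpr h2, Bool.eq_false_iff.mpr h3, Bool.eq_false_iff.mpr h4, Bool.eq_false_iff.mpr h5, Bool.eq_false_iff.mpr h6, Bool.eq_false_iff.mpr h7, Bool.eq_false_iff.mpr h8, Bool.eq_false_iff.mpr h9, Bool.eq_false_iff.mpr h10, Bool.eq_false_iff.mpr h11]) (Or.inr h12)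
                            rw [hm]
                            simp [pvChain, pvArchs, h0, h1, h2, h3, h4, h5, h6, h7, h8, h9, h10, h11, h12]
                          · have hm : pvM (PySem.Str.lower f) ts = 13 :=
                              pv_m_eq _ _ 13 (by omega) (by intro j hj; interval_cases j; exacts [Bool.eq_false_iff.mpr h0, Bool.eq_false_iff.mpr h1, Bool.eq_false_iff.mpr h2, Bool.eq_false_iff.mpr h3, Bool.eq_false_iff.mpr h4, Bool.eq_false_iff.mpr h5, Bool.eq_false_iff.mpr h6, Bool.eq_false_iff.mpr h7, Bool.eq_false_iff.mpr h8, Bool.eq_false_iff.mpr h9, Bool.eq_false_iff.mpr h10, Bool.eq_false_iff.mpr h11, Bool.eq_false_iff.mpr h12]) (Or.inl rfl)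
                            rw [hm]
                            simp [pvChain, pvArchs, h0, h1, h2, h3, h4, h5, h6, h7, h8, h9, h10, h11, h12]
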